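-- pv_equiv track=rewrite | github.com/cocktail-collective/cocktail | src/cocktail/ui/settings/controller.py | walk_namespaces
-- ===== SOURCE A (Python) =====
-- def walk_namespaces(namespace: str) -> list[str]:
--     """
--     Walks a namespace and returns a list of all the namespaces and keys.
--     """
--     namespaces = []
--     while "/" in namespace:
--         namespace, key = namespace.rsplit("/", 1)
--         namespaces.append((namespace, f"{namespace}/{key}", key))
--
--     namespaces.append((None, namespace, namespace))
--     namespaces.reverse()
--     return namespaces
-- ===== SOURCE B (Python) =====
-- def walk_namespaces(namespace: str) -> list[str]:
--     """
--     Walks a namespace and returns a list of all the namespaces and keys.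
--     Forward single pass over the '/'-separated parts, threading the running prefix.
--     """
--     parts = namespace.split("/")
--     result = [(None, parts[0], parts[0])]
--     prefix = parts[0]
--     for part in parts[1:]:
--         full = f"{prefix}/{part}"
--         result.append((prefix, full, part))
--         prefix = full
--     return result
-- ===== Notes on version B (the rewrite author's own statement) =====
-- stated objective: simpler
-- what changed: Replaces A's backward while-loop of one-step right-splits followed by a final reverse with a single forward pass over the slash-separated parts that threads the running prefix and appends tuples in output order.
import Mathlib
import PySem

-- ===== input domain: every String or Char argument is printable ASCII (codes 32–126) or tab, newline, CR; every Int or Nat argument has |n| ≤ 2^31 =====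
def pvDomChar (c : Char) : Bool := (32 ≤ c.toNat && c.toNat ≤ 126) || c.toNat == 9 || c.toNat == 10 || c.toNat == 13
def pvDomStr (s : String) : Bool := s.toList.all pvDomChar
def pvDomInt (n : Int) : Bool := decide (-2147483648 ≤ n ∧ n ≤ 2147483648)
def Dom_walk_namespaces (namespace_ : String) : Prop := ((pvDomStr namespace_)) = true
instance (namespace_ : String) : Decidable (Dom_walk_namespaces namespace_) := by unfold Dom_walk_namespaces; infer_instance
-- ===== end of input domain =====

-- B replaces A's backward rsplit-and-reverse loop by one forward pass over namespace.split('/')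
-- threading the running prefix (objective: simpler; return value only, no mutation involved).

-- ===== PORT A =====

-- hand port of s.rsplit("/", 1): exact whenever "/" occurs in s (the only way A calls it)
def pvRsplitSlash (cs : List Char) : List Char × List Char :=
  let r := cs.reverse
  let keyR := r.takeWhile (fun c => c != '/')
  ((r.drop (keyR.length + 1)).reverse, keyR.reverse)

-- termination fact for A's while loop (cited by decreasing_by)
theorem pvRsplitSlash_lt (cs : List Char) (h : PySem.Chars.isIn ['/'] cs = true) :
    (pvRsplitSlash cs).1.length < cs.length := by
  have hne : cs ≠ [] := by
    rintro rfl
    rw [PySem.Chars.isIn_iff_infix] at h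
    rcases h with ⟨s, t, he⟩
    simpa using congrArg List.length he
  have hlen : 0 < cs.length := List.length_pos_iff.mpr hne
  simp only [pvRsplitSlash, List.length_reverse, List.length_drop]
  omega

def pvLoopA (cs : List Char) (acc : List (Option String × String × String)) :
    List (Option String × String × String) :=
  if h : PySem.Chars.isIn ['/'] cs = true then
    let p := pvRsplitSlash cs
    pvLoopA p.1 (acc ++ [(some (String.ofList p.1), (String.ofList (p.1 ++ '/' :: p.2)), (String.ofList p.2))])
  else
    (acc ++ [(none, (String.ofList cs), (String.ofList cs))]).reverse
termination_by cs.length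
decreasing_by all_goals exact pvRsplitSlash_lt cs h

def walk_namespaces (namespace_ : String) : List (Option String × String × String) :=
  pvLoopA namespace_.toList []

-- ===== PORT B =====

-- forward pass: emit one tuple per remaining part, threading the running prefix
def pvAltGo (pre : List Char) : List (List Char) → List (Option String × String × String)
  | [] => []
  | k :: rest =>
      (some (String.ofList pre), (String.ofList (pre ++ '/' :: k)), (String.ofList k)) :: pvAltGo (pre ++ '/' :: k) rest

def walk_namespaces_alt (namespace_ : String) : List (Option String × String × String) :=
  -- namespace.split("/") ported as List.splitOn (single non-empty separator)
  match namespace_.toList.splitOn '/' with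
  | [] => []   -- unreachable: splitOn never returns []
  | p :: rest => (none, (String.ofList p), (String.ofList p)) :: pvAltGo p rest

-- ===== PRECONDITION & SPEC =====
def Spec_walk_namespaces (namespace_ : String) (out : List (Option String × String × String)) : Prop := out = walk_namespaces_alt namespace_
instance (namespace_ : String) (out : List (Option String × String × String)) : Decidable (Spec_walk_namespaces namespace_ out) := by unfold Spec_walk_namespaces; infer_instance

-- ===== CLAIM (what is proved, stated in full; the proofs are below) =====
def Claim_equal_walk_namespaces : Prop := ∀ (namespace_ : String), Dom_walk_namespaces namespace_ → Spec_walk_namespaces namespace_ (walk_namespaces namespace_)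

-- ===== LEMMAS AND PROOFS =====

-- no element of splitOnP satisfies the predicate
theorem pv_mem_splitOnP_no (p : Char → Bool) : ∀ (cs l : List Char), l ∈ cs.splitOnP p → ∀ x ∈ l, ¬ p x
  | [], l, hl => by simp [List.splitOnP_nil] at hl; subst hl; simp
  | c :: cs, l, hl => by
    rw [List.splitOnP_cons] at hl
    by_cases hc : p c
    · simp [hc] at hl
      rcases hl with h | h
      · subst h; simp
      · exact pv_mem_splitOnP_no p cs l h
    · simp [hc] at hl
      rcases List.exists_cons_of_ne_nil (List.splitOnP_ne_nil p cs) with ⟨hd, tl, he⟩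
      rw [he] at hl
      simp [List.modifyHead] at hl
      rcases hl with h | h
      · subst h; intro x hx
        rcases List.mem_cons.mp hx with rfl | hx'
        · simpa using hc
        · exact pv_mem_splitOnP_no p cs hd (by rw [he]; exact List.mem_cons_self) x hx'
      · exact pv_mem_splitOnP_no p cs l (by rw [he]; exact List.mem_cons_of_mem _ h)

theorem pv_mem_splitOn_no (cs l : List Char) (hl : l ∈ cs.splitOn '/') : '/' ∉ l := by
  intro hx
  exact pv_mem_splitOnP_no (· == '/') cs l hl '/' hx (by simp)

-- the separated join B's prefix threading computes
def pvJoin (p : List Char) (rest : List (List Char)) : List Char :=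
  rest.foldl (fun a k => a ++ '/' :: k) p

theorem pvJoin_append (p k : List Char) (rest : List (List Char)) :
    pvJoin p (rest ++ [k]) = pvJoin p rest ++ '/' :: k := by
  simp [pvJoin]

theorem pvJoin_prefix : ∀ (rest : List (List Char)) (x y : List Char),
    pvJoin (x ++ y) rest = x ++ pvJoin y rest
  | [], x, y => by simp [pvJoin]
  | q :: rest, x, y => by
    simp only [pvJoin, List.foldl_cons]
    rw [show (x ++ y) ++ '/' :: q = x ++ (y ++ '/' :: q) by simp]
    exact pvJoin_prefix rest x (y ++ '/' :: q)

theorem pvJoin_eq_intercalate : ∀ (rest : List (List Char)) (p : List Char),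
    List.intercalate ['/'] (p :: rest) = pvJoin p rest
  | [], p => by simp [pvJoin, List.intercalate]
  | q :: rest, p => by
    have h2 : List.intercalate ['/'] (p :: q :: rest) =
        p ++ ['/'] ++ List.intercalate ['/'] (q :: rest) := by
      simp [List.intercalate, List.intersperse]
    rw [h2, pvJoin_eq_intercalate rest q,
        show pvJoin p (q :: rest) = pvJoin ((p ++ ['/']) ++ q) rest by simp [pvJoin],
        pvJoin_prefix]

theorem pv_takeWhile_ne (k l : List Char) (hk : '/' ∉ k) :
    (k ++ '/' :: l).takeWhile (fun c => c != '/') = k := by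
  induction k with
  | nil => simp
  | cons c k ih =>
    have hc : c ≠ '/' := fun h => hk (h ▸ List.mem_cons_self)
    have hk' : '/' ∉ k := fun h => hk (List.mem_cons_of_mem _ h)
    simp [hc, ih hk']

theorem pvRsplitSlash_eq (l k : List Char) (hk : '/' ∉ k) :
    pvRsplitSlash (l ++ '/' :: k) = (l, k) := by
  have hrev : (l ++ '/' :: k).reverse = k.reverse ++ '/' :: l.reverse := by simp
  have hkrev : '/' ∉ k.reverse := by simpa using hk
  have htake := pv_takeWhile_ne k.reverse l.reverse hkrev
  simp only [pvRsplitSlash, hrev, htake]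
  have hdrop : (k.reverse ++ '/' :: l.reverse).drop (k.length + 1) = l.reverse := by
    rw [show k.reverse ++ '/' :: l.reverse = (k.reverse ++ ['/']) ++ l.reverse by simp,
        show k.length + 1 = (k.reverse ++ ['/']).length by simp]
    exact List.drop_left
  simp [hdrop]

-- A's accumulator splits off
theorem pvLoopA_acc (cs : List Char) (acc : List (Option String × String × String)) :
    pvLoopA cs acc = pvLoopA cs [] ++ acc.reverse := by
  by_cases h : PySem.Chars.isIn ['/'] cs = true
  · conv_lhs => rw [pvLoopA, dif_pos h]
    conv_rhs => rw [pvLoopA, dif_pos h]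
    rw [pvLoopA_acc (pvRsplitSlash cs).1 (acc ++ _), pvLoopA_acc (pvRsplitSlash cs).1 ([] ++ _)]
    simp
  · conv_lhs => rw [pvLoopA, dif_neg h]
    conv_rhs => rw [pvLoopA, dif_neg h]
    simp
termination_by cs.length
decreasing_by all_goals exact pvRsplitSlash_lt cs h

theorem pvAltGo_append : ∀ (rest : List (List Char)) (p k : List Char),
    pvAltGo p (rest ++ [k]) =
      pvAltGo p rest ++ [(some (String.ofList (pvJoin p rest)), (String.ofList (pvJoin p rest ++ '/' :: k)), (String.ofList k))]
  | [], p, k => by simp [pvAltGo, pvJoin]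
  | q :: rest, p, k => by
    simp only [List.cons_append, pvAltGo]
    rw [pvAltGo_append rest (p ++ '/' :: q) k]
    simp [pvJoin]

-- the core correspondence, by reverse induction on the parts list
theorem pv_main (parts : List (List Char)) (p : List Char)
    (hno : ∀ x ∈ p :: parts, '/' ∉ x) :
    pvLoopA (pvJoin p parts) [] = (none, (String.ofList p), (String.ofList p)) :: pvAltGo p parts := by
  induction parts using List.reverseRecOn with
  | nil =>
    have hp : '/' ∉ p := hno p List.mem_cons_self
    rw [pvLoopA]
    have hcond : PySem.Chars.isIn ['/'] (pvJoin p []) = false := by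
      rw [PySem.Chars.isIn_eq_false_iff]
      intro ⟨s, t, he⟩
      apply hp
      simp only [pvJoin, List.foldl_nil] at he
      rw [← he]; simp
    simp [pvJoin] at hcond ⊢
    simp [hcond, pvAltGo]
  | append_singleton rest k ih =>
    have hk : '/' ∉ k := hno k (by simp)
    have hno' : ∀ x ∈ p :: rest, '/' ∉ x := by
      intro x hx
      rcases List.mem_cons.mp hx with rfl | hx'
      · exact hno x List.mem_cons_self
      · exact hno x (by simp [hx'])
    rw [pvJoin_append, pvLoopA]
    have hcond : PySem.Chars.isIn ['/'] (pvJoin p rest ++ '/' :: k) = true := by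
      rw [PySem.Chars.isIn_iff_infix]
      exact ⟨pvJoin p rest, k, by simp⟩
    rw [dif_pos hcond]
    have hsplit := pvRsplitSlash_eq (pvJoin p rest) k hk
    simp only [hsplit]
    rw [pvLoopA_acc, ih hno', pvAltGo_append]
    simp

-- ===== VERDICT (by name: the statement is the Claim_ definition above) =====
theorem walk_namespaces_spec : Claim_equal_walk_namespaces := by
  intro s _
  unfold Spec_walk_namespaces walk_namespaces walk_namespaces_alt
  rcases he : s.toList.splitOn '/' with _ | ⟨p, rest⟩
  · exact absurd he (List.splitOnP_ne_nil _ _)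
  · have hno : ∀ x ∈ p :: rest, '/' ∉ x := by
      intro x hx
      exact pv_mem_splitOn_no s.toList x (he ▸ hx)
    have hs : s.toList = pvJoin p rest := by
      rw [← pvJoin_eq_intercalate, ← he]
      exact (List.intercalate_splitOn s.toList '/').symm
    rw [hs]
    exact pv_main rest p hno
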